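-- pv_equiv track=rewrite | github.com/QuickLap/First_university_semester | no_6/Text_editing.py | Find_expression
-- ===== SOURCE A (Python) =====
-- def Find_expression(text):
-- 	'''
--
-- 	Функция находит арифметическое выражение в тексте
--
-- 	Возвращает строку - арифм. выражение, если оно имеется в тексте,
-- 	в противном случае возвращает пустую строку.
--
-- 	'''
-- 	special_symbols = ['+', '-', '*', '(', ')', '/', '√', '^']
-- 	numbers = "1234567890"
-- 	unique_symbols = "+-*/√^" # Символы встречающиеся в тексте только в арифм. выражении
-- 	answer = ""
-- 	for elem in text:
-- 		for index, ch in enumerate(elem):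
-- 			if ch in unique_symbols:
-- 				index_plus = index - 1
-- 				while index_plus >= 0 and (elem[index_plus] in numbers or elem[index_plus] in special_symbols):
-- 					answer = elem[index_plus] + answer
-- 					index_plus -= 1
-- 				while index < len(elem) and (elem[index] in numbers or elem[index] in special_symbols):
-- 					answer += elem[index]
-- 					index += 1
-- 				return answer
-- 	return ""
-- ===== SOURCE B (Python) =====
-- def Find_expression(text):
--     cls = set("1234567890+-*()/√^")
--     uniq = set("+-*/√^")
--     for elem in text:
--         # split elem into maximal runs of expression characters
--         runs = []
--         cur = ""
--         for ch in elem: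
--             if ch in cls:
--                 cur += ch
--             else:
--                 if cur:
--                     runs.append(cur)
--                 cur = ""
--         if cur:
--             runs.append(cur)
--         # first run that actually contains an operator is the expression
--         for run in runs:
--             if any(c in uniq for c in run):
--                 return run
--     return ""
-- ===== Notes on version B (the rewrite author's own statement) =====
-- stated objective: simpler
-- what changed: Instead of locating the first operator character and expanding backward then forward over the expression-character class, B splits each element into maximal runs of expression characters and returns the first run that contains an operator.
import Mathlib
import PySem

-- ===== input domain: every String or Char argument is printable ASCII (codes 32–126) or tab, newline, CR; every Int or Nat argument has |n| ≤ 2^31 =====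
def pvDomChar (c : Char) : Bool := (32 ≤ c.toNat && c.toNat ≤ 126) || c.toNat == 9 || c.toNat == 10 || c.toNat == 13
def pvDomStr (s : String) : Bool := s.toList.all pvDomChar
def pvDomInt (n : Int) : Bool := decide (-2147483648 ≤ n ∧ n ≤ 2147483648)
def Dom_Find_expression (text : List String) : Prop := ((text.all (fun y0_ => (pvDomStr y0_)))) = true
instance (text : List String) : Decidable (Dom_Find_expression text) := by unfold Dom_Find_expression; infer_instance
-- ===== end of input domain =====

-- B replaces A's first-operator-then-expand-backward/forward scan with a run collector: split each
-- elem into maximal runs of expression characters and return the first run containing an operator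
-- (objective: simpler; same asymptotic cost).

-- ===== PORT A =====
def pySpecial : List Char := ['+', '-', '*', '(', ')', '/', '√', '^']
def pyNumbers : List Char := ['1', '2', '3', '4', '5', '6', '7', '8', '9', '0']
def pyUnique : List Char := ['+', '-', '*', '/', '√', '^']

-- while index_plus >= 0 and elem[index_plus] in numbers/special: prepend char; argument n = index_plus+1
def FE_back (cs : List Char) : Nat → List Char → List Char
  | 0, ans => ans
  | ip + 1, ans =>
    let c := cs.getD ip ' '
    if c ∈ pyNumbers ∨ c ∈ pySpecial then FE_back cs ip (c :: ans) else ans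

-- while index < len(elem) and elem[index] in numbers/special: append char
def FE_fwd (cs : List Char) (i : Nat) (ans : List Char) : List Char :=
  if h : i < cs.length then
    if cs[i] ∈ pyNumbers ∨ cs[i] ∈ pySpecial then FE_fwd cs (i + 1) (ans ++ [cs[i]]) else ans
  else ans
termination_by cs.length - i

-- for index, ch in enumerate(elem): first ch in unique_symbols triggers the expansion and return
def FE_scan (cs : List Char) : Nat → List Char → Option (List Char)
  | _, [] => none
  | i, ch :: rest =>
    if ch ∈ pyUnique then some (FE_fwd cs i (FE_back cs i [])) else FE_scan cs (i + 1) rest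

def Find_expression (text : List String) : String :=
  match text with
  | [] => ""
  | e :: rest =>
    match FE_scan e.toList 0 e.toList with
    | some a => String.ofList a
    | none => Find_expression rest

-- ===== PORT B =====
def bCls : List Char := ['1', '2', '3', '4', '5', '6', '7', '8', '9', '0',
                         '+', '-', '*', '(', ')', '/', '√', '^']
def bUniq : List Char := ['+', '-', '*', '/', '√', '^']

-- split into maximal runs of expression characters (cur = run being built)
def FE_runs : List Char → List Char → List (List Char)
  | [], cur => if cur ≠ [] then [cur] else []
  | c :: rest, cur =>
    if c ∈ bCls then FE_runs rest (cur ++ [c])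
    else (if cur ≠ [] then [cur] else []) ++ FE_runs rest []

-- first run that contains an operator
def FE_first : List (List Char) → Option (List Char)
  | [] => none
  | r :: rs => if r.any (· ∈ bUniq) then some r else FE_first rs

def Find_expression_alt (text : List String) : String :=
  match text with
  | [] => ""
  | e :: rest =>
    match FE_first (FE_runs e.toList []) with
    | some r => String.ofList r
    | none => Find_expression_alt rest

-- ===== PRECONDITION & SPEC =====
def Spec_Find_expression (text : List String) (out : String) : Prop := out = Find_expression_alt text
instance (text : List String) (out : String) : Decidable (Spec_Find_expression text out) := by unfold Spec_Find_expression; infer_instance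

-- ===== CLAIM (what is proved, stated in full; the proofs are below) =====
def Claim_equal_Find_expression : Prop := ∀ (text : List String), Dom_Find_expression text → Spec_Find_expression text (Find_expression text)

-- ===== LEMMAS AND PROOFS =====

def inCls (c : Char) : Bool := decide (c ∈ bCls)
def uniqB (c : Char) : Bool := decide (c ∈ bUniq)

theorem cls_decomp : bCls = pyNumbers ++ pySpecial := by decide

theorem mem_cls (c : Char) : (c ∈ pyNumbers ∨ c ∈ pySpecial) ↔ inCls c = true := by
  simp [inCls, cls_decomp, List.mem_append]

theorem uniq_sub (c : Char) (h : uniqB c = true) : inCls c = true := by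
  simp only [uniqB, decide_eq_true_eq] at h
  fin_cases h <;> decide

theorem py_uniq (c : Char) : (c ∈ pyUnique) ↔ uniqB c = true := by
  simp [uniqB, pyUnique, bUniq]

-- result of A's backward while loop
def backRun (cs : List Char) (n : Nat) : List Char :=
  (((cs.take n).reverse).takeWhile inCls).reverse

-- A's characterization per element
def resA (cs : List Char) : Option (List Char) :=
  (cs.findIdx? uniqB).map (fun j => backRun cs j ++ (cs.drop j).takeWhile inCls)

theorem back_eq (cs : List Char) : ∀ (n : Nat) (ans : List Char), n ≤ cs.length →
    FE_back cs n ans = backRun cs n ++ ans := by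
  intro n
  induction n with
  | zero => intro ans _; simp [FE_back, backRun]
  | succ m ih =>
    intro ans h
    have hm : m < cs.length := Nat.lt_of_succ_le h
    have hget : cs.getD m ' ' = cs[m] := List.getD_eq_getElem cs ' ' hm
    have htake : cs.take (m + 1) = cs.take m ++ [cs[m]] := by
      rw [List.take_add_one]; simp [List.getElem?_eq_getElem hm]
    have hrev : (cs.take (m + 1)).reverse = cs[m] :: (cs.take m).reverse := by
      rw [htake]; simp
    by_cases hc : inCls cs[m] = true
    · have hc' : cs[m] ∈ pyNumbers ∨ cs[m] ∈ pySpecial := (mem_cls _).mpr hc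
      rw [FE_back]
      simp only [hget, if_pos hc']
      rw [ih _ (Nat.le_of_lt hm)]
      have : backRun cs (m + 1) = backRun cs m ++ [cs[m]] := by
        unfold backRun
        rw [hrev, List.takeWhile_cons, if_pos hc, List.reverse_cons]
      rw [this, List.append_assoc]; rfl
    · have hc' : ¬ (cs[m] ∈ pyNumbers ∨ cs[m] ∈ pySpecial) := fun hh => hc ((mem_cls _).mp hh)
      rw [FE_back]
      simp only [hget, if_neg hc']
      have : backRun cs (m + 1) = [] := by
        unfold backRun
        rw [hrev, List.takeWhile_cons, if_neg (by simp [hc]), List.reverse_nil]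
      rw [this]; rfl

theorem fwd_eq_aux (cs : List Char) : ∀ (k i : Nat) (ans : List Char), cs.length - i ≤ k →
    FE_fwd cs i ans = ans ++ (cs.drop i).takeWhile inCls := by
  intro k
  induction k with
  | zero =>
    intro i ans h
    have hle : cs.length ≤ i := by omega
    rw [FE_fwd]
    simp [Nat.not_lt.mpr hle, List.drop_of_length_le hle]
  | succ m ih =>
    intro i ans h
    by_cases hi : i < cs.length
    · have hdrop : cs.drop i = cs[i] :: cs.drop (i + 1) := (List.getElem_cons_drop hi).symm
      by_cases hc : inCls cs[i] = true
      · have hc' : cs[i] ∈ pyNumbers ∨ cs[i] ∈ pySpecial := (mem_cls _).mpr hc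
        rw [FE_fwd]
        simp only [dif_pos hi, if_pos hc']
        rw [ih (i + 1) _ (by omega), hdrop, List.takeWhile_cons, if_pos hc]
        simp
      · have hc' : ¬ (cs[i] ∈ pyNumbers ∨ cs[i] ∈ pySpecial) := fun hh => hc ((mem_cls _).mp hh)
        rw [FE_fwd]
        simp only [dif_pos hi, if_neg hc']
        rw [hdrop, List.takeWhile_cons, if_neg (by simp [hc])]
        simp
    · rw [FE_fwd]
      simp [hi, List.drop_of_length_le (Nat.le_of_not_lt hi)]

theorem fwd_eq (cs : List Char) (i : Nat) (ans : List Char) :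
    FE_fwd cs i ans = ans ++ (cs.drop i).takeWhile inCls :=
  fwd_eq_aux cs (cs.length - i) i ans (Nat.le_refl _)

theorem scan_eq (cs : List Char) : ∀ (suf : List Char) (k : Nat), cs.drop k = suf →
    FE_scan cs k suf =
      (suf.findIdx? uniqB).map (fun j => backRun cs (k + j) ++ ((cs.drop (k + j)).takeWhile inCls)) := by
  intro suf
  induction suf with
  | nil => intro k _; simp [FE_scan]
  | cons ch rest ih =>
    intro k hk
    have hkl : k < cs.length := by
      by_contra hh
      rw [List.drop_of_length_le (Nat.le_of_not_lt hh)] at hk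
      exact List.cons_ne_nil _ _ hk.symm
    have hcons : cs[k] :: cs.drop (k + 1) = ch :: rest := (List.getElem_cons_drop hkl).trans hk
    have hch : ch = cs[k] := (List.cons_eq_cons.mp hcons).1.symm
    have hrest : cs.drop (k + 1) = rest := (List.cons_eq_cons.mp hcons).2
    by_cases hu : uniqB ch = true
    · have hu' : ch ∈ pyUnique := (py_uniq ch).mpr hu
      rw [FE_scan, if_pos hu', List.findIdx?_cons, if_pos hu]
      rw [fwd_eq, back_eq cs k [] (Nat.le_of_lt hkl)]
      simp
    · have hu' : ch ∉ pyUnique := fun hh => hu ((py_uniq ch).mp hh)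
      rw [FE_scan, if_neg hu', List.findIdx?_cons, if_neg hu]
      rw [ih (k + 1) hrest, Option.map_map]
      congr 1
      funext j
      simp only [Function.comp]
      rw [show k + 1 + j = k + (j + 1) from by omega]

-- takeWhile stops at a failing element regardless of what follows it
theorem takeWhile_append_neg {p : Char → Bool} {d : Char} (hd : p d = false) :
    ∀ (l m : List Char), (l ++ d :: m).takeWhile p = l.takeWhile p := by
  intro l
  induction l with
  | nil => intro m; simp [hd]
  | cons a l ih =>
    intro m
    by_cases ha : p a = true
    · simp [ha, ih]
    · simp [ha]

theorem takeWhile_dropWhile_nil {p : Char → Bool} : ∀ (l : List Char),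
    (l.dropWhile p).takeWhile p = [] := by
  intro l
  induction l with
  | nil => simp
  | cons a l ih =>
    by_cases ha : p a = true
    · simp [ha, ih]
    · simp [ha]

theorem dropWhile_head_false {p : Char → Bool} : ∀ (l : List Char) (d : Char) (m : List Char),
    l.dropWhile p = d :: m → p d = false := by
  intro l
  induction l with
  | nil => intro d m h; simp at h
  | cons a l ih =>
    intro d m h
    by_cases ha : p a = true
    · rw [List.dropWhile_cons, if_pos ha] at h; exact ih d m h
    · rw [List.dropWhile_cons, if_neg ha] at h
      cases h
      exact Bool.eq_false_iff.mpr ha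

-- skipping a unique-free prefix whose last char is outside the class leaves resA unchanged
theorem resA_shift (Q' : List Char) (d : Char) (rest : List Char)
    (hd : inCls d = false) (hno : ∀ c ∈ Q' ++ [d], uniqB c = false) :
    resA ((Q' ++ [d]) ++ rest) = resA rest := by
  have hnone : (Q' ++ [d]).findIdx? uniqB = none := List.findIdx?_eq_none_iff.mpr hno
  unfold resA
  rw [List.findIdx?_append, hnone, Option.none_or, Option.map_map]
  congr 1
  funext j
  simp only [Function.comp]
  have hQ : (Q' ++ [d]).length = Q'.length + 1 := by simp
  have htake : ((Q' ++ [d]) ++ rest).take (j + (Q' ++ [d]).length)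
      = (Q' ++ [d]) ++ rest.take j := by
    rw [List.take_append]
    congr 1
    · exact List.take_of_length_le (by omega)
    · congr 1; omega
  have hback : backRun ((Q' ++ [d]) ++ rest) (j + (Q' ++ [d]).length) = backRun rest j := by
    unfold backRun
    rw [htake]
    have : ((Q' ++ [d]) ++ rest.take j).reverse = (rest.take j).reverse ++ d :: Q'.reverse := by
      simp
    rw [this, takeWhile_append_neg hd]
  have hdrop : ((Q' ++ [d]) ++ rest).drop (j + (Q' ++ [d]).length) = rest.drop j := by
    rw [List.drop_append]
    rw [List.drop_of_length_le (by omega)]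
    simp only [List.nil_append]
    congr 1; omega
  rw [hback, hdrop]

-- the run collector peels exactly one maximal run
theorem runs_split : ∀ (cs cur : List Char),
    FE_runs cs cur =
      (if cur ++ cs.takeWhile inCls ≠ [] then [cur ++ cs.takeWhile inCls] else [])
        ++ FE_runs ((cs.dropWhile inCls).tail) [] := by
  intro cs
  induction cs with
  | nil => intro cur; simp [FE_runs]
  | cons c rest ih =>
    intro cur
    by_cases hc : c ∈ bCls
    · have hcb : inCls c = true := by simp [inCls, hc]
      rw [FE_runs, if_pos hc, ih (cur ++ [c])]
      simp [hcb]
    · have hcb : inCls c = false := by simp [inCls, hc]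
      rw [FE_runs, if_neg hc]
      simp only [List.takeWhile_cons, List.dropWhile_cons, hcb]
      simp

theorem uniq_pred (r : List Char) : (r.any (· ∈ bUniq)) = r.any uniqB := rfl

-- main per-element lemma
theorem main_aux : ∀ (n : Nat) (cs : List Char), cs.length ≤ n →
    resA cs = FE_first (FE_runs cs []) := by
  intro n
  induction n with
  | zero =>
    intro cs h
    have : cs = [] := List.length_eq_zero_iff.mp (Nat.le_zero.mp h)
    subst this
    simp [resA, FE_runs, FE_first]
  | succ m ih =>
    intro cs h
    match cs with
    | [] => simp [resA, FE_runs, FE_first]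
    | c :: cs' =>
      by_cases hc : inCls c = true
      · -- first char is in the class: peel the first maximal run R
        set R := (c :: cs').takeWhile inCls with hR
        have hRc : R = c :: cs'.takeWhile inCls := by rw [hR]; simp [hc]
        have hRne : R ≠ [] := by rw [hRc]; exact List.cons_ne_nil _ _
        have hsplit : FE_runs (c :: cs') [] = R :: FE_runs ((List.dropWhile inCls (c :: cs')).tail) [] := by
          rw [runs_split]
          simp [← hR, hRne]
        have hcsRD : c :: cs' = R ++ List.dropWhile inCls (c :: cs') :=
          (List.takeWhile_append_dropWhile).symm
        by_cases hany : R.any uniqB = true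
        · -- the run contains an operator: both sides return R
          have hsome : (R.findIdx? uniqB).isSome := by rw [List.findIdx?_isSome, hany]
          obtain ⟨j, hj⟩ := Option.isSome_iff_exists.mp hsome
          have hjlt : j < R.length := (List.findIdx?_eq_some_iff_findIdx_eq.mp hj).1
          have hidx : (c :: cs').findIdx? uniqB = some j := by
            rw [hcsRD, List.findIdx?_append, hj]; rfl
          have hj0 : j - R.length = 0 := by omega
          have hval : backRun (c :: cs') j ++ ((c :: cs').drop j).takeWhile inCls = R := by
            have htj : (c :: cs').take j = R.take j := by
              rw [hcsRD, List.take_append, hj0]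
              simp
            have hallR : ∀ x ∈ R.take j, inCls x = true := by
              intro x hx
              have hxR : x ∈ R := List.take_subset _ _ hx
              rw [hR] at hxR
              exact List.mem_takeWhile_imp hxR
            have hbr : backRun (c :: cs') j = R.take j := by
              unfold backRun
              rw [htj]
              rw [List.takeWhile_eq_self_iff.mpr (by intro x hx; exact hallR x (by simpa using hx))]
              simp
            have hdj : (c :: cs').drop j = R.drop j ++ List.dropWhile inCls (c :: cs') := by
              conv_lhs => rw [hcsRD]
              rw [List.drop_append, hj0]
              simp
            have halld : ∀ x ∈ R.drop j, inCls x = true := by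
              intro x hx
              have hxR : x ∈ R := List.drop_subset _ _ hx
              rw [hR] at hxR
              exact List.mem_takeWhile_imp hxR
            have htw : ((c :: cs').drop j).takeWhile inCls = R.drop j := by
              rw [hdj, List.takeWhile_append]
              rw [if_pos (by rw [List.takeWhile_eq_self_iff.mpr halld])]
              rw [takeWhile_dropWhile_nil]
              simp
            rw [hbr, htw, List.take_append_drop]
          rw [hsplit, FE_first, uniq_pred, if_pos hany]
          unfold resA
          rw [hidx, Option.map_some, hval]
        · -- no operator in the run: skip R and its delimiter
          have hanyf : R.any uniqB = false := Bool.eq_false_iff.mpr hany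
          have hnoR : ∀ x ∈ R, uniqB x = false := by
            intro x hx
            exact Bool.eq_false_iff.mpr (List.any_eq_false.mp hanyf x hx)
          cases hDc : List.dropWhile inCls (c :: cs') with
          | nil =>
            rw [hDc] at hsplit hcsRD
            rw [List.append_nil] at hcsRD
            have hidx : (c :: cs').findIdx? uniqB = none := by
              rw [hcsRD]; exact List.findIdx?_eq_none_iff.mpr hnoR
            rw [hsplit, FE_first, uniq_pred, if_neg (by rw [hanyf]; simp)]
            unfold resA
            rw [hidx]
            simp [FE_runs, FE_first]
          | cons d D' =>
            rw [hDc] at hsplit hcsRD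
            have hdcls : inCls d = false := dropWhile_head_false (c :: cs') d D' hDc
            have hnod : uniqB d = false := by
              by_contra hh
              have h2 := uniq_sub d (Bool.of_not_eq_false hh)
              rw [hdcls] at h2
              exact Bool.false_ne_true h2
            have hcseq : c :: cs' = (R ++ [d]) ++ D' := by
              rw [hcsRD]; simp
            have hshift : resA (c :: cs') = resA D' := by
              rw [hcseq]
              apply resA_shift R d D' hdcls
              intro x hx
              rcases List.mem_append.mp hx with hx | hx
              · exact hnoR x hx
              · simp at hx; subst hx; exact hnod
            have hlen : D'.length ≤ m := by
              have h1 : (c :: cs').length = ((R ++ [d]) ++ D').length := by rw [← hcseq]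
              have h2 : 1 ≤ R.length := by rw [hRc]; simp
              simp only [List.length_cons, List.length_append] at h1 h
              omega
            rw [hshift, hsplit, FE_first, uniq_pred, if_neg (by rw [hanyf]; simp)]
            simp only [List.tail_cons]
            exact ih D' hlen
      · -- first char outside the class: it is skipped by both sides
        have hcf : inCls c = false := Bool.eq_false_iff.mpr hc
        have hcp : c ∉ bCls := by simpa [inCls] using hcf
        have hnoc : uniqB c = false := by
          by_contra hh
          have h2 := uniq_sub c (Bool.of_not_eq_false hh)
          rw [hcf] at h2
          exact Bool.false_ne_true h2
        have hshift : resA (c :: cs') = resA cs' := by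
          have heq : c :: cs' = ([] ++ [c]) ++ cs' := by simp
          rw [heq]
          apply resA_shift [] c cs' hcf
          intro x hx
          simp at hx
          subst hx
          exact hnoc
        have hruns : FE_runs (c :: cs') [] = FE_runs cs' [] := by
          rw [FE_runs, if_neg hcp]; simp
        rw [hshift, hruns]
        exact ih cs' (by simp at h; omega)

theorem per_elem (cs : List Char) : FE_scan cs 0 cs = FE_first (FE_runs cs []) := by
  have h1 := scan_eq cs cs 0 (by simp)
  simp only [Nat.zero_add] at h1
  rw [h1]
  exact main_aux cs.length cs (le_refl _)

-- ===== VERDICT (by name: the statement is the Claim_ definition above) =====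
theorem Find_expression_spec : Claim_equal_Find_expression := by
  intro text h
  unfold Spec_Find_expression
  induction text with
  | nil => rfl
  | cons e rest ih =>
    have hr : Dom_Find_expression rest := by
      simp only [Dom_Find_expression, List.all_cons, Bool.and_eq_true] at h ⊢
      exact h.2
    simp only [Find_expression, Find_expression_alt, per_elem]
    cases FE_first (FE_runs e.toList []) with
    | none => simpa using ih hr
    | some a => rfl
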